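-- pv_equiv track=rewrite | github.com/pypi-data/pypi-mirror-339 | packages/simetri/simetri-0.0.6-py3-none-any.whl/simetri/helpers/utilities.py | group_into_bins
-- ===== SOURCE A (Python) =====
-- def group_into_bins(values, delta):
--     """Group values into bins.
--
--     Args:
--         values: A list of numbers.
--         delta: The bin size.
--
--     Returns:
--         A list of bins.
--     """
--     values.sort()
--     bins = []
--     bin_ = [values[0]]
--     for value in values[1:]:
--         if value[0] - bin_[0][0] <= delta:
--             bin_.append(value)
--         else:
--             bins.append(bin_)
--             bin_ = [value]
--     bins.append(bin_)
--     return bins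
-- ===== SOURCE B (Python) =====
-- def group_into_bins(values, delta):
--     """Group values into bins.
--
--     Args:
--         values: A list of numbers.
--         delta: The bin size.
--
--     Returns:
--         A list of bins.
--     """
--     values.sort()
--     bins = []
--     rest = values
--     while rest:
--         anchor = rest[0]
--         k = 1
--         n = len(rest)
--         while k < n and rest[k][0] - anchor[0] <= delta:
--             k += 1
--         bins.append(rest[:k])
--         rest = rest[k:]
--     return bins
-- ===== Notes on version B (the rewrite author's own statement) =====
-- stated objective: alternative
-- what changed: Replaces A's incremental append loop (growing the current bin element by element) with a two-phase scheme: an index scan finds the end of each bin, which is then cut out of the sorted list as one slice; Pre_ excludes only the empty list, where A raises IndexError.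
import Mathlib
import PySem

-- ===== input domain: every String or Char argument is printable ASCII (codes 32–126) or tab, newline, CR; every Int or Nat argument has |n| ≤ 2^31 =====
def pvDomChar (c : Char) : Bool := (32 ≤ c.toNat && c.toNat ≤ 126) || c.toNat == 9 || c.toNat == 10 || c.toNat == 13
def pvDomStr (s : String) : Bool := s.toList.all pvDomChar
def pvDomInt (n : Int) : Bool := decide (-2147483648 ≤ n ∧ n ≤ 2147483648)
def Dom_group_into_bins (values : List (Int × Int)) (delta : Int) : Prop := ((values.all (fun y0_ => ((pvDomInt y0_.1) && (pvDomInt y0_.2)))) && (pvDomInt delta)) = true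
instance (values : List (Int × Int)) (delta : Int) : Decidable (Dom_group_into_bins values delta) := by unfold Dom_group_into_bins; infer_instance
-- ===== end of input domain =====

-- B groups the sorted list by slicing off each bin in one step (outer while over the
-- remaining suffix, inner index scan) instead of A's element-by-element append loop;
-- on the empty list A raises IndexError while B returns [].  Both Pythons sort the
-- argument in place; the equivalence proved here is about the RETURN value.

-- ===== PORT A =====
-- A's for-loop: state (bins, bin_); bin_ is never empty, so the getD default is unreachable.
def pvALoop (delta : Int) : List (Int × Int) → List (List (Int × Int)) → List (Int × Int) → List (List (Int × Int))
  | [], bins, bin_ => bins ++ [bin_]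
  | v :: r, bins, bin_ =>
    if v.1 - ((PySem.List.pyGet? bin_ 0).getD (0, 0)).1 ≤ delta then
      pvALoop delta r bins (bin_ ++ [v])
    else
      pvALoop delta r (bins ++ [bin_]) [v]

def group_into_bins (values : List (Int × Int)) (delta : Int) : List (List (Int × Int)) :=
  match PySem.List.pyGet? (PySem.List.sorted2 values Prod.fst Prod.snd) 0 with
  | none => []   -- values = []: Python raises IndexError here; excluded by Pre_
  | some v0 =>
    pvALoop delta (PySem.List.slice (PySem.List.sorted2 values Prod.fst Prod.snd) (some 1) none) [] [v0]

-- ===== PORT B =====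
-- inner while: k := first index ≥ k with k = n or rest[k][0] - anchor[0] > delta
def pvBInner (rest : List (Int × Int)) (anchor : Int × Int) (delta : Int) (k : Nat) : Nat :=
  if h : k < rest.length then
    if (rest[k]'h).1 - anchor.1 ≤ delta then pvBInner rest anchor delta (k + 1) else k
  else k
termination_by rest.length - k

-- used only for pvBOuter's termination: the inner scan never moves k backwards
lemma pvBInner_le (anchor : Int × Int) (delta : Int) (k : Nat) (rest : List (Int × Int)) :
    k ≤ pvBInner rest anchor delta k := by
  fun_induction pvBInner rest anchor delta k <;> omega

-- outer while over the remaining suffix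
def pvBOuter (delta : Int) (rest : List (Int × Int)) (bins : List (List (Int × Int))) : List (List (Int × Int)) :=
  match rest with
  | [] => bins
  | a :: t =>
    let k := pvBInner (a :: t) a delta 1
    pvBOuter delta (PySem.List.slice (a :: t) (some (k : Int)) none)
      (bins ++ [PySem.List.slice (a :: t) none (some (k : Int))])
termination_by rest.length
decreasing_by
  rw [PySem.List.slice_from_natCast]
  have h1 : 1 ≤ pvBInner (a :: t) a delta 1 := pvBInner_le a delta 1 (a :: t)
  simp; omega

def group_into_bins_alt (values : List (Int × Int)) (delta : Int) : List (List (Int × Int)) :=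
  pvBOuter delta (PySem.List.sorted2 values Prod.fst Prod.snd) []

-- ===== PRECONDITION & SPEC =====
-- Pre_ excludes only the empty list, on which A raises IndexError (values[0]).
def Pre_group_into_bins (values : List (Int × Int)) (delta : Int) : Prop := values ≠ []
instance (values : List (Int × Int)) (delta : Int) : Decidable (Pre_group_into_bins values delta) := by unfold Pre_group_into_bins; infer_instance

def pvWitness_group_into_bins : (List (Int × Int)) × Int := ([(3, 0), (1, 2), (1, 1), (6, 0)], 2)

def Spec_group_into_bins (values : List (Int × Int)) (delta : Int) (out : List (List (Int × Int))) : Prop := out = group_into_bins_alt values delta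
instance (values : List (Int × Int)) (delta : Int) (out : List (List (Int × Int))) : Decidable (Spec_group_into_bins values delta out) := by unfold Spec_group_into_bins; infer_instance

-- ===== CLAIM (what is proved, stated in full; the proofs are below) =====
def Claim_equal_group_into_bins : Prop := ∀ (values : List (Int × Int)) (delta : Int), Dom_group_into_bins values delta → Pre_group_into_bins values delta → Spec_group_into_bins values delta (group_into_bins values delta)

-- ===== LEMMAS AND PROOFS =====

-- the common span-recursive grouping both ports compute on the sorted list
def pvGroups (delta : Int) : List (Int × Int) → List (List (Int × Int))
  | [] => []
  | a :: t =>
    (a :: t.takeWhile (fun v => decide (v.1 - a.1 ≤ delta))) ::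
      pvGroups delta (t.dropWhile (fun v => decide (v.1 - a.1 ≤ delta)))
termination_by l => l.length
decreasing_by
  have := List.length_dropWhile_le (p := fun v => decide (v.1 - a.1 ≤ delta)) (l := t)
  simp only [List.length_cons]; omega

lemma pvALoop_eq (delta : Int) (r : List (Int × Int)) :
    ∀ (b0 : Int × Int) (bt : List (Int × Int)) (bins : List (List (Int × Int))),
    pvALoop delta r bins (b0 :: bt) =
      bins ++ (b0 :: (bt ++ r.takeWhile (fun v => decide (v.1 - b0.1 ≤ delta)))) ::
        pvGroups delta (r.dropWhile (fun v => decide (v.1 - b0.1 ≤ delta))) := by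
  induction r with
  | nil =>
    intro b0 bt bins
    simp only [List.takeWhile_nil, List.dropWhile_nil, List.append_nil]
    rw [pvGroups.eq_def]
    simp [pvALoop]
  | cons v r ih =>
    intro b0 bt bins
    simp only [pvALoop, PySem.List.pyGet?_zero_cons, Option.getD_some, List.takeWhile_cons,
      List.dropWhile_cons]
    by_cases h : v.1 - b0.1 ≤ delta
    · rw [if_pos h, show (b0 :: bt) ++ [v] = b0 :: (bt ++ [v]) from rfl,
        ih b0 (bt ++ [v]) bins]
      simp [h]
    · rw [if_neg h, ih v [] (bins ++ [b0 :: bt])]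
      have hp : pvGroups delta (v :: r) =
          (v :: r.takeWhile (fun w => decide (w.1 - v.1 ≤ delta))) ::
            pvGroups delta (r.dropWhile (fun w => decide (w.1 - v.1 ≤ delta))) := by
        rw [pvGroups.eq_def]
      simp [h, hp]

lemma pvBInner_eq (delta : Int) (anchor : Int × Int) :
    ∀ (rest : List (Int × Int)) (k : Nat),
    pvBInner rest anchor delta k =
      k + ((rest.drop k).takeWhile (fun v => decide (v.1 - anchor.1 ≤ delta))).length := by
  intro rest k
  fun_induction pvBInner rest anchor delta k with
  | case1 k h hle ih =>
    rw [ih, List.drop_eq_getElem_cons h, List.takeWhile_cons]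
    simp [hle]; omega
  | case2 k h hgt =>
    rw [List.drop_eq_getElem_cons h, List.takeWhile_cons]
    simp [hgt]
  | case3 k h =>
    rw [List.drop_eq_nil_of_le (by omega)]; simp

-- the two phases of B reassemble A's bins: take/drop at the scan index are takeWhile/dropWhile
lemma pvDrop_takeWhile_len (p : (Int × Int) → Bool) (t : List (Int × Int)) :
    t.drop (t.takeWhile p).length = t.dropWhile p := by
  induction t with
  | nil => simp
  | cons a t ih => by_cases h : p a <;> simp [h, ih]

lemma pvBOuter_eq_aux (delta : Int) :
    ∀ (n : Nat) (rest : List (Int × Int)) (bins : List (List (Int × Int))), rest.length ≤ n →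
    pvBOuter delta rest bins = bins ++ pvGroups delta rest := by
  intro n
  induction n with
  | zero =>
    intro rest bins h
    match rest with
    | [] => rw [pvBOuter.eq_def, pvGroups.eq_def]; simp
  | succ n ihn =>
    intro rest bins h
    match rest with
    | [] => rw [pvBOuter.eq_def, pvGroups.eq_def]; simp
    | a :: t =>
      have hk : pvBInner (a :: t) a delta 1 =
          1 + (t.takeWhile (fun v => decide (v.1 - a.1 ≤ delta))).length := by
        simpa using pvBInner_eq delta a (a :: t) 1
      have hdrop : (a :: t).drop (1 + (t.takeWhile (fun v => decide (v.1 - a.1 ≤ delta))).length)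
          = t.dropWhile (fun v => decide (v.1 - a.1 ≤ delta)) := by
        simp [Nat.add_comm 1, pvDrop_takeWhile_len]
      have htake : (a :: t).take (1 + (t.takeWhile (fun v => decide (v.1 - a.1 ≤ delta))).length)
          = a :: t.takeWhile (fun v => decide (v.1 - a.1 ≤ delta)) := by
        simp [Nat.add_comm 1, ← List.prefix_iff_eq_take.mp (List.takeWhile_prefix _)]
      have hlen : (t.dropWhile (fun v => decide (v.1 - a.1 ≤ delta))).length ≤ n := by
        have := List.length_dropWhile_le (p := fun v => decide (v.1 - a.1 ≤ delta)) (l := t)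
        simp only [List.length_cons] at h
        omega
      rw [pvBOuter.eq_def]
      simp only [hk, PySem.List.slice_from_natCast, PySem.List.slice_to_natCast, hdrop, htake]
      rw [ihn _ _ hlen]
      conv_rhs => rw [pvGroups.eq_def]
      simp

lemma pvBOuter_eq (delta : Int) (rest : List (Int × Int)) (bins : List (List (Int × Int))) :
    pvBOuter delta rest bins = bins ++ pvGroups delta rest :=
  pvBOuter_eq_aux delta rest.length rest bins le_rfl

-- ===== VERDICT (by name: the statement is the Claim_ definition above) =====
theorem group_into_bins_spec : Claim_equal_group_into_bins := by
  intro values delta _ hne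
  unfold Spec_group_into_bins group_into_bins group_into_bins_alt
  have hperm := PySem.List.sorted2_perm values Prod.fst Prod.snd false
  cases hsort : PySem.List.sorted2 values Prod.fst Prod.snd with
  | nil =>
    rw [hsort] at hperm
    exact absurd hperm.symm.eq_nil hne
  | cons v0 r =>
    simp only [PySem.List.pyGet?_zero_cons, PySem.List.slice_from_one, List.tail_cons]
    rw [pvALoop_eq, pvBOuter_eq]
    conv_rhs => rw [pvGroups.eq_def]
    simp
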